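-- pv_equiv track=rewrite | github.com/Ddady1/PolyBot | services/bot/app.py | info_link
-- ===== SOURCE A (Python) =====
-- def info_link(filename):
--     # Creating the object info link
--     splitted = filename.split(' - ')
--     full = []
--     for item in splitted:
--         part = item.replace(' ', '-')
--         full.append(part + '/')
--     full = ''.join(full)
--     songfact = f'https://www.songfacts.com/facts/{full}'
--     return songfact
-- ===== SOURCE B (Python) =====
-- def info_link(filename):
--     # Same URL, built by chained string transformations instead of split/loop/join:
--     # ' - ' separators become '/', remaining spaces become '-', trailing '/' appended.
--     return f"https://www.songfacts.com/facts/{filename.replace(' - ', '/').replace(' ', '-')}/"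
-- ===== Notes on version B (the rewrite author's own statement) =====
-- stated objective: simpler
-- what changed: Replaced the split-into-list / per-item loop / join pipeline with two chained str.replace calls (' - '->'/' then ' '->'-') embedded directly in the f-string with a trailing slash.
import Mathlib
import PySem

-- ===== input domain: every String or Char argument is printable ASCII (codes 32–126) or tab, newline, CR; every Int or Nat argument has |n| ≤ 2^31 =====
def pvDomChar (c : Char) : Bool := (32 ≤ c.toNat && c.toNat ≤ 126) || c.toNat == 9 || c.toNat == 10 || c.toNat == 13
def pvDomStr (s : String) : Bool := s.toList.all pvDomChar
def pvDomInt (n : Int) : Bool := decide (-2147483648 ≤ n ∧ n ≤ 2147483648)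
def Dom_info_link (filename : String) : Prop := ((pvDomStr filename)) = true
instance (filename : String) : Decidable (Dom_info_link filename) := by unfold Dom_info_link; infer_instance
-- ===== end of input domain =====

-- B replaces A's split / per-segment loop / join with two chained replaces; objective: simpler.

-- ===== PORT A =====
-- filename.split(' - '): sep is a nonempty literal, so Python never raises; Chars.splitOn is exact there.
def info_link (filename : String) : String :=
  let splitted : List String := (PySem.Chars.splitOn filename.toList " - ".toList).map String.ofList
  let full : List String :=
    splitted.foldl (fun acc item =>
      let part := PySem.Str.replace item " " "-"
      acc ++ [part ++ "/"]) []
  let fullJ := PySem.Str.join "" full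
  "https://www.songfacts.com/facts/" ++ fullJ

-- ===== PORT B =====
def info_link_alt (filename : String) : String :=
  "https://www.songfacts.com/facts/" ++
    PySem.Str.replace (PySem.Str.replace filename " - " "/") " " "-" ++ "/"

-- ===== PRECONDITION & SPEC =====
def Spec_info_link (filename : String) (out : String) : Prop := out = info_link_alt filename
instance (filename : String) (out : String) : Decidable (Spec_info_link filename out) := by unfold Spec_info_link; infer_instance

-- ===== CLAIM (what is proved, stated in full; the proofs are below) =====
def Claim_equal_info_link : Prop := ∀ (filename : String), Dom_info_link filename → Spec_info_link filename (info_link filename)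

-- ===== LEMMAS AND PROOFS =====

-- the separator ' - ' as chars
def pvSep : List Char := [' ', '-', ' ']

-- replacing a single space (the effect of replace item ' ' '-' characterwise)
def pvR (c : Char) : Char := if c = ' ' then '-' else c

-- structural model of replace s ' - ' '/'
def pvRepSep : List Char → List Char
  | [] => []
  | c :: t => if pvSep.isPrefixOf (c :: t) then '/' :: pvRepSep (t.drop 2) else c :: pvRepSep t
termination_by l => l.length
decreasing_by all_goals (simp; try omega)

-- structural model of split on ' - '
def pvSplit : List Char → List (List Char)
  | [] => [[]]
  | c :: t =>
    if pvSep.isPrefixOf (c :: t) then [] :: pvSplit (t.drop 2)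
    else match pvSplit t with
         | [] => [[c]]
         | h :: tl => (c :: h) :: tl
termination_by l => l.length
decreasing_by all_goals (simp; try omega)

def pvCons (pre : List Char) : List (List Char) → List (List Char)
  | [] => [pre]
  | h :: t => (pre ++ h) :: t

lemma pvRepSep_pos (c : Char) (t : List Char) (h : pvSep <+: (c :: t)) :
    pvRepSep (c :: t) = '/' :: pvRepSep (t.drop 2) := by
  rw [pvRepSep.eq_def]; simp [h]

lemma pvRepSep_neg (c : Char) (t : List Char) (h : ¬ pvSep <+: (c :: t)) :
    pvRepSep (c :: t) = c :: pvRepSep t := by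
  rw [pvRepSep.eq_def]; simp [h]


lemma pvSplit_pos (c : Char) (t : List Char) (h : pvSep <+: (c :: t)) :
    pvSplit (c :: t) = [] :: pvSplit (t.drop 2) := by
  rw [pvSplit.eq_def]; simp [h]

lemma pvSplit_neg (c : Char) (t : List Char) (a : List Char) (b : List (List Char))
    (h : ¬ pvSep <+: (c :: t)) (hs : pvSplit t = a :: b) :
    pvSplit (c :: t) = (c :: a) :: b := by
  rw [pvSplit.eq_def]; simp [h, hs]

lemma pvSplit_ne_nil (l : List Char) : pvSplit l ≠ [] := by
  cases l with
  | nil => simp [pvSplit]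
  | cons c t =>
    by_cases hp : pvSep <+: (c :: t)
    · rw [pvSplit_pos c t hp]; simp
    · rw [pvSplit.eq_def]
      cases hs : pvSplit t <;> simp [hp, hs]

lemma pv_go_sp (fuel : Nat) : ∀ (l acc : List Char), l.length ≤ fuel →
    PySem.Chars.replace.go [' '] ['-'] fuel l acc = acc.reverse ++ l.map pvR := by
  induction fuel with
  | zero =>
    intro l acc h
    have hl : l = [] := by cases l <;> simp_all
    subst hl; rw [PySem.Chars.replace.go]; simp
  | succ n ih =>
    intro l acc h
    cases l with
    | nil => rw [PySem.Chars.replace.go]; simp; try omega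
    | cons c t =>
      rw [PySem.Chars.replace.go]
      by_cases hc : c = ' '
      · have hp : List.isPrefixOf [' '] (c :: t) = true := by simp [hc, List.isPrefixOf]
        simp only [hp, if_pos]
        rw [ih _ _ (by simpa using h)]
        simp [hc, pvR]
      · have hp : List.isPrefixOf [' '] (c :: t) = false := by
          simp [List.isPrefixOf]; exact fun hh => hc hh.symm
        simp only [hp, Bool.false_eq_true, if_neg, not_false_iff]
        rw [ih _ _ (by simpa using h)]
        simp [pvR, hc]

lemma pv_go_sep (fuel : Nat) : ∀ (l acc : List Char), l.length ≤ fuel →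
    PySem.Chars.replace.go pvSep ['/'] fuel l acc = acc.reverse ++ pvRepSep l := by
  induction fuel with
  | zero =>
    intro l acc h
    have hl : l = [] := by cases l <;> simp_all
    subst hl; rw [PySem.Chars.replace.go]; simp [pvRepSep]
  | succ n ih =>
    intro l acc h
    cases l with
    | nil => rw [PySem.Chars.replace.go]; simp [pvRepSep]; try omega
    | cons c t =>
      rw [PySem.Chars.replace.go]
      by_cases hp : List.isPrefixOf pvSep (c :: t) = true
      · simp only [hp, if_pos]
        have hd : List.drop pvSep.length (c :: t) = t.drop 2 := by simp [pvSep]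
        rw [hd, ih _ _ (by simp at h ⊢; omega), pvRepSep_pos c t (by simpa using hp)]
        simp
      · simp only [hp, if_neg, Bool.false_eq_true, not_false_iff]
        rw [ih _ _ (by simpa using h), pvRepSep_neg c t (by simpa using hp)]
        simp

lemma pv_go_split (fuel : Nat) : ∀ (l cur : List Char) (acc : List (List Char)), l.length ≤ fuel →
    PySem.Chars.splitOn.go pvSep fuel l cur acc = acc.reverse ++ pvCons cur.reverse (pvSplit l) := by
  induction fuel with
  | zero =>
    intro l cur acc h
    have hl : l = [] := by cases l <;> simp_all
    subst hl; rw [PySem.Chars.splitOn.go]; simp [pvSplit, pvCons]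
  | succ n ih =>
    intro l cur acc h
    cases l with
    | nil => rw [PySem.Chars.splitOn.go]; simp [pvSplit, pvCons]; try omega
    | cons c t =>
      rw [PySem.Chars.splitOn.go]
      by_cases hp : List.isPrefixOf pvSep (c :: t) = true
      · simp only [hp, if_pos]
        have hd : List.drop pvSep.length (c :: t) = t.drop 2 := by simp [pvSep]
        rw [hd, ih _ _ _ (by simp at h ⊢; omega), pvSplit_pos c t (by simpa using hp)]
        cases hz : pvSplit (t.drop 2) with
        | nil => exact absurd hz (pvSplit_ne_nil _)
        | cons a b => simp [pvCons]
      · simp only [hp, if_neg, Bool.false_eq_true, not_false_iff]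
        rw [ih _ _ _ (by simpa using h)]
        cases hs : pvSplit t with
        | nil => exact absurd hs (pvSplit_ne_nil _)
        | cons a b =>
          rw [pvSplit_neg c t a b (by simpa using hp) hs]
          simp [pvCons]

lemma pv_main (fuel : Nat) : ∀ (l : List Char), l.length ≤ fuel →
    ((pvSplit l).map (fun it => it.map pvR ++ ['/'])).flatten = (pvRepSep l).map pvR ++ ['/'] := by
  induction fuel with
  | zero =>
    intro l h
    have hl : l = [] := by cases l <;> simp_all
    subst hl; simp [pvSplit, pvRepSep]
  | succ n ih =>
    intro l h
    cases l with
    | nil => simp [pvSplit, pvRepSep]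
    | cons c t =>
      by_cases hp : List.isPrefixOf pvSep (c :: t) = true
      · rw [pvSplit_pos c t (by simpa using hp), pvRepSep_pos c t (by simpa using hp)]
        have := ih (t.drop 2) (by simp at h ⊢; omega)
        simp [this, pvR]
      · have hp' : ¬ pvSep <+: (c :: t) := by simpa using hp
        cases hs : pvSplit t with
        | nil => exact absurd hs (pvSplit_ne_nil _)
        | cons a b =>
          rw [pvSplit_neg c t a b hp' hs, pvRepSep_neg c t hp']
          have := ih t (by simpa using h)
          rw [hs] at this
          simp only [List.map_cons, List.flatten_cons] at this ⊢
          simp at this ⊢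
          simp [this]

lemma pv_chars_eq (cs : List Char) :
    PySem.Chars.join [] ((PySem.Chars.splitOn cs pvSep).map
        (fun it => PySem.Chars.replace it [' '] ['-'] ++ ['/']))
      = PySem.Chars.replace (PySem.Chars.replace cs pvSep ['/']) [' '] ['-'] ++ ['/'] := by
  have hrepSp : ∀ (l : List Char), PySem.Chars.replace l [' '] ['-'] = l.map pvR := by
    intro l
    rw [PySem.Chars.replace]
    simp only [List.isEmpty_cons, Bool.false_eq_true, if_neg, not_false_iff]
    exact (pv_go_sp _ _ _ (le_refl _)).trans (by simp)
  have hsplit : PySem.Chars.splitOn cs pvSep = pvSplit cs := by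
    rw [PySem.Chars.splitOn, pv_go_split _ _ _ _ (by omega)]
    cases hs : pvSplit cs with
    | nil => exact absurd hs (pvSplit_ne_nil cs)
    | cons h t => simp [pvCons]
  have hrepSep : PySem.Chars.replace cs pvSep ['/'] = pvRepSep cs := by
    rw [PySem.Chars.replace]
    simp only [pvSep, List.isEmpty_cons, Bool.false_eq_true, if_neg, not_false_iff]
    exact (pv_go_sep _ _ _ (le_refl _)).trans (by simp)
  have hjoin : ∀ (parts : List (List Char)), PySem.Chars.join [] parts = parts.flatten := by
    intro parts
    rw [PySem.Chars.join]
    induction parts with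
    | nil => simp [List.intercalate]
    | cons p ps ihp =>
      cases ps with
      | nil => simp [List.intercalate, List.intersperse]
      | cons q qs => simp_all [List.intercalate, List.intersperse]
  rw [hsplit, hrepSep, hjoin]
  simp only [hrepSp]
  exact pv_main cs.length cs (le_refl _)

-- ===== VERDICT (by name: the statement is the Claim_ definition above) =====
theorem info_link_spec : Claim_equal_info_link := by
  intro filename _
  unfold Spec_info_link info_link info_link_alt
  apply String.toList_inj.mp
  simp only [String.toList_append, PySem.Str.toList_replace, PySem.Str.toList_join,
    PySem.List.foldl_append_singleton_eq_map, List.nil_append, List.map_map, List.append_assoc]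
  congr 1
  have hsep : " - ".toList = pvSep := by decide
  have hsp : " ".toList = [' '] := by decide
  have hdash : "-".toList = ['-'] := by decide
  have hslash : "/".toList = ['/'] := by decide
  rw [hsep, hsp, hdash, hslash, ← pv_chars_eq filename.toList]
  congr 1
  simp [Function.comp, PySem.Str.toList_replace]
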